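-- pv_equiv track=rewrite | github.com/manojnayakkuna/leetcode_easy | misc_algorithms/leastElementFromSortedArray.py | leastElementFromSortedArray
-- ===== SOURCE A (Python) =====
-- def partition(arr,startLen,endLen):
--     pivot = arr[endLen]
--     i = startLen
--     for j in range(startLen,endLen):
--         if arr[j] < pivot:
--             arr[j], arr[i] = arr[i], arr[j]
--             i += 1
--     arr[i],arr[endLen] = arr[endLen], arr[i]
--     return i
--
-- def quickSort(arr,low,high):
--     if low < high:
--         pi = partition(arr,low,high)
--         quickSort(arr,low,pi-1)
--         quickSort(arr,pi+1,high)
--     return arr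
--
-- def leastElementFromSortedArray(arr):
--     quickSort(arr,0,len(arr)-1)
--     #countArr = [0 for _ in range(len(arr))]
--     holdCnt = 9999
--
--     prevVal = None
--     currCnt = 0
--     currVal = None
--
--     for i in range(len(arr)):
--         if currVal == None:
--             prevVal = arr[i]
--             currVal = arr[i]
--             currCnt += 1
--         else:
--             if currVal == arr[i]:
--                 currCnt += 1
--             else:
--                 if currCnt < holdCnt:
--                     prevVal = currVal
--                     holdCnt = currCnt
--                 currVal = arr[i]
--                 currCnt = 1
--     return prevVal, holdCnt
-- ===== SOURCE B (Python) =====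
-- def leastElementFromSortedArray(arr):
--     counts = {}
--     for x in arr:
--         counts[x] = counts.get(x, 0) + 1
--     val = min(counts, key=lambda k: (counts[k], k))
--     return val, counts[val]
-- ===== Notes on version B (the rewrite author's own statement) =====
-- stated objective: faster
-- what changed: B replaces A's hand-written in-place quicksort followed by a sequential group-run scan with a single-pass dictionary count and one min() over the distinct keys; Pre_ excludes the empty list, on which A returns (None, 9999) while B's min() raises ValueError.
-- intended difference: On nonempty arrays whose maximum value is strictly the least frequent one, or where every other value occurs at least 9999 times (including single-valued arrays), A never examines the final sorted group and falls back to its initialiser, returning a stale value with the sentinel count, while B returns the genuinely least frequent element with its true count, which is the intended behaviour of a least-frequent-element function. — e.g. on leastElementFromSortedArray([2, 2]): A returns (some 2, 9999), B returns (some 2, 2)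
-- outside the precondition, e.g. on leastElementFromSortedArray([]): A returns (None, 9999), B raises ValueError
import Mathlib
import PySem

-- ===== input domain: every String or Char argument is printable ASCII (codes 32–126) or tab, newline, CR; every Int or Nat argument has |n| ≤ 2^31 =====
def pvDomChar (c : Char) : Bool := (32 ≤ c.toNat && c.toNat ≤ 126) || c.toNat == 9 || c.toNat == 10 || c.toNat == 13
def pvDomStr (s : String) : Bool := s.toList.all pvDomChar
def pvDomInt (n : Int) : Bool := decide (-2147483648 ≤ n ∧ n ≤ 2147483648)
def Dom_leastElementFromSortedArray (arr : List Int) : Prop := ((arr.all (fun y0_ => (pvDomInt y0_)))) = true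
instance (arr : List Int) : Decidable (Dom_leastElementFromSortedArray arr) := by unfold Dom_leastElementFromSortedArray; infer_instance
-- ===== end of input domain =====

-- B replaces A's in-place quicksort + group scan by a dict count and one min over the distinct
-- keys; the equivalence is about the RETURN value only (A also sorts `arr` in place in Python).

-- ===== PORT A =====
-- arr[i] for an Int index; on every executed access 0 ≤ i < len (proved in the lemmas), where pyGetD is Python-exact
def idxA (a : List Int) (i : Int) : Int := PySem.List.pyGetD a i 0
-- 'arr[p], arr[q] = arr[q], arr[p]'
def swapA (a : List Int) (p q : Int) : List Int := (a.set p.toNat (idxA a q)).set q.toNat (idxA a p)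
-- the body of partition's for-loop, state (arr, i)
def pstep (piv : Int) (st : List Int × Int) (j : Int) : List Int × Int :=
  if idxA st.1 j < piv then (swapA st.1 j st.2, st.2 + 1) else st
def partitionA (a : List Int) (startLen endLen : Int) : List Int × Int :=
  let piv := idxA a endLen
  let st := (PySem.List.pyRange startLen endLen 1).foldl (pstep piv) (a, startLen)
  (swapA st.1 st.2 endLen, st.2)

-- termination helper for quickSortA: partition's returned index lies in [low, low + (high-low)]
theorem ploop_i_bounds (js : List Int) (piv : Int) : ∀ (a : List Int) (i : Int),
    i ≤ (js.foldl (pstep piv) (a, i)).2 ∧ (js.foldl (pstep piv) (a, i)).2 ≤ i + (js.length : Int) := by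
  induction js with
  | nil => intro a i; simp
  | cons j t ih =>
    intro a i
    simp only [List.foldl_cons, pstep]
    split
    · have h := ih (swapA a j i) (i + 1)
      simp only [List.length_cons]
      constructor
      · omega
      · push_cast; omega
    · have h := ih a i
      simp only [List.length_cons]
      constructor
      · omega
      · push_cast; omega

theorem partition_i_bounds (a : List Int) (low high : Int) :
    low ≤ (partitionA a low high).2 ∧ (partitionA a low high).2 ≤ low + ((high - low).toNat : Int) := by
  have h := ploop_i_bounds (PySem.List.pyRange low high 1) (idxA a high) a low
  simpa [partitionA, PySem.List.length_pyRange_one] using h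

theorem partition_pi_bounds (a : List Int) (low high : Int) (h : low < high) :
    low ≤ (partitionA a low high).2 ∧ (partitionA a low high).2 ≤ high := by
  have hb := partition_i_bounds a low high
  omega

theorem qs_dec_left (low high pi : Int) (hb : low ≤ pi ∧ pi ≤ high) (h : low < high) :
    (pi - 1 - low + 1).toNat < (high - low + 1).toNat := by omega

theorem qs_dec_right (low high pi : Int) (hb : low ≤ pi ∧ pi ≤ high) (h : low < high) :
    (high - (pi + 1) + 1).toNat < (high - low + 1).toNat := by omega

def quickSortA (a : List Int) (low high : Int) : List Int :=
  if h : low < high then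
    let p := partitionA a low high
    quickSortA (quickSortA p.1 low (p.2 - 1)) (p.2 + 1) high
  else a
termination_by (high - low + 1).toNat
decreasing_by
  · exact qs_dec_left low high _ (partition_pi_bounds a low high h) h
  · exact qs_dec_right low high _ (partition_pi_bounds a low high h) h

-- the body of the counting for-loop (state (prevVal, currVal, currCnt, holdCnt))
def sstep (st : Option Int × Option Int × Int × Int) (x : Int) : Option Int × Option Int × Int × Int :=
  match st.2.1 with
  | none => (some x, some x, st.2.2.1 + 1, st.2.2.2)
  | some c =>
    if c = x then (st.1, st.2.1, st.2.2.1 + 1, st.2.2.2)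
    else if st.2.2.1 < st.2.2.2 then (some c, some x, 1, st.2.2.1)
    else (st.1, some x, 1, st.2.2.2)

def leastElementFromSortedArray (arr : List Int) : Option Int × Int :=
  let s := quickSortA arr 0 ((arr.length : Int) - 1)
  let st := (PySem.List.pyRange 0 (s.length : Int) 1).foldl
    (fun st i => sstep st (PySem.List.pyGetD s i 0)) (none, none, 0, 9999)
  (st.1, st.2.2.2)

-- ===== PORT B =====
def leastElementFromSortedArray_alt (arr : List Int) : Option Int × Int :=
  let counts := arr.foldl (fun (d : PySem.Dict Int Int) x => d.insert x (d.getD x 0 + 1)) PySem.Dict.empty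
  match PySem.List.min2? counts.keys (fun k => counts.getD k 0) (fun k => k) with   -- min(counts, key=lambda k: (counts[k], k))
  | some v => (some v, counts.getD v 0)
  | none => (none, 0)     -- min() of an empty dict raises ValueError; unreachable under Pre_

-- ===== PRECONDITION & SPEC =====
-- Pre_ excludes the empty list: there A returns (None, 9999) while B's min() raises ValueError.
def Pre_leastElementFromSortedArray (arr : List Int) : Prop := arr ≠ []
instance (arr : List Int) : Decidable (Pre_leastElementFromSortedArray arr) := by unfold Pre_leastElementFromSortedArray; infer_instance
def pvWitness_leastElementFromSortedArray : List Int := [1, 2, 2, 3]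

-- On nonempty arrays whose maximum value is strictly the least frequent one, or where every other
-- value occurs at least 9999 times (including single-valued arrays), A never examines the final
-- sorted group and falls back to its initialiser, returning a stale value with the sentinel count,
-- while B returns the genuinely least frequent element with its true count, which is the intended
-- behaviour of a least-frequent-element function.
def D_leastElementFromSortedArray (arr : List Int) : Prop :=
  arr ≠ [] ∧
    ((∀ x ∈ arr, x ≠ arr.foldl max (arr.headD 0) → arr.count (arr.foldl max (arr.headD 0)) < arr.count x) ∨
     (∀ x ∈ arr, x ≠ arr.foldl max (arr.headD 0) → 9999 ≤ arr.count x))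
instance (arr : List Int) : Decidable (D_leastElementFromSortedArray arr) := by unfold D_leastElementFromSortedArray; infer_instance

def Spec_leastElementFromSortedArray (arr : List Int) (out : Option Int × Int) : Prop :=
  ¬ D_leastElementFromSortedArray arr → out = leastElementFromSortedArray_alt arr
instance (arr : List Int) (out : Option Int × Int) : Decidable (Spec_leastElementFromSortedArray arr out) := by unfold Spec_leastElementFromSortedArray; infer_instance

def pvDiffWitness_leastElementFromSortedArray : List Int := [2, 2]
def pvDiffWitnessOut_leastElementFromSortedArray : (Option Int × Int) × (Option Int × Int) := ((some 2, 9999), (some 2, 2))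

-- ===== CLAIM (what is proved, stated in full; the proofs are below) =====
def Claim_unchanged_leastElementFromSortedArray : Prop := ∀ (arr : List Int), Dom_leastElementFromSortedArray arr → Pre_leastElementFromSortedArray arr → Spec_leastElementFromSortedArray arr (leastElementFromSortedArray arr)
def Claim_changed_leastElementFromSortedArray : Prop := Dom_leastElementFromSortedArray (pvDiffWitness_leastElementFromSortedArray) ∧ Pre_leastElementFromSortedArray (pvDiffWitness_leastElementFromSortedArray) ∧ D_leastElementFromSortedArray (pvDiffWitness_leastElementFromSortedArray) ∧ leastElementFromSortedArray (pvDiffWitness_leastElementFromSortedArray) = pvDiffWitnessOut_leastElementFromSortedArray.1 ∧ leastElementFromSortedArray_alt (pvDiffWitness_leastElementFromSortedArray) = pvDiffWitnessOut_leastElementFromSortedArray.2 ∧ pvDiffWitnessOut_leastElementFromSortedArray.1 ≠ pvDiffWitnessOut_leastElementFromSortedArray.2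

-- ===== LEMMAS AND PROOFS =====

-- ---- generic index facts ----
theorem idxA_nonneg_getD (a : List Int) (k : Int) (hk : 0 ≤ k) : idxA a k = a[k.toNat]?.getD 0 := by
  simp [idxA, PySem.List.pyGetD, PySem.List.pyGet?, PySem.List.pyIdx?, hk]
  split
  · rfl
  · rw [List.getElem?_eq_none (by omega)]
    rfl

theorem length_swapA (a : List Int) (p q : Int) : (swapA a p q).length = a.length := by
  simp [swapA]

theorem idxA_swap (a : List Int) (p q k : Int)
    (hp0 : 0 ≤ p) (hp : p < (a.length : Int)) (hq0 : 0 ≤ q) (hq : q < (a.length : Int)) (hk : 0 ≤ k) :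
    idxA (swapA a p q) k = if k = p then idxA a q else if k = q then idxA a p else idxA a k := by
  simp only [swapA, idxA_nonneg_getD _ _ hk, idxA_nonneg_getD _ _ hp0, idxA_nonneg_getD _ _ hq0]
  rw [List.getElem?_set, List.getElem?_set]
  simp only [List.length_set]
  split_ifs <;> first | rfl | (exfalso; omega) | simp_all

-- ---- the segment [l, h) of a list, as the list of its values ----
def segm (a : List Int) (l h : Int) : List Int := (PySem.List.pyRange l h 1).map (fun k => idxA a k)

theorem segm_congr {a b : List Int} {l h : Int}
    (hab : ∀ k, l ≤ k → k < h → idxA a k = idxA b k) : segm a l h = segm b l h := by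
  apply List.map_congr_left
  intro k hk
  rw [PySem.List.mem_pyRange_one] at hk
  exact hab k hk.1 hk.2

theorem segm_cons (a : List Int) {l h : Int} (hl : l < h) :
    segm a l h = idxA a l :: segm a (l + 1) h := by
  rw [segm, PySem.List.pyRange_one_cons hl]; rfl

theorem segm_snoc (a : List Int) {l h : Int} (hl : l ≤ h) :
    segm a l (h + 1) = segm a l h ++ [idxA a h] := by
  rw [segm, PySem.List.pyRange_one_succ_right hl]; simp [segm]

theorem segm_append (a : List Int) {l m h : Int} (h1 : l ≤ m) (h2 : m ≤ h) :
    segm a l h = segm a l m ++ segm a m h := by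
  rw [segm, PySem.List.pyRange_one_append l m h h1 h2]; simp [segm]

theorem mem_segm {a : List Int} {l h x : Int} :
    x ∈ segm a l h ↔ ∃ k, (l ≤ k ∧ k < h) ∧ idxA a k = x := by
  simp [segm, PySem.List.mem_pyRange_one]

theorem segm_full (a : List Int) : segm a 0 (a.length : Int) = a := by
  simpa only [segm, idxA] using PySem.List.map_pyGetD_pyRange_zero' a 0

theorem swap_segm_perm_aux (a : List Int) (p q l h : Int)
    (hl0 : 0 ≤ l) (hlp : l ≤ p) (_hlq : l ≤ q) (hqh : q < h)
    (hh : h ≤ (a.length : Int)) (hpq : p < q) : (segm (swapA a p q) l h).Perm (segm a l h) := by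
  have hp' : p < (a.length : Int) := by omega
  have hq' : q < (a.length : Int) := by omega
  have hsw := fun k hk => idxA_swap a p q k (by omega) hp' (by omega) hq' hk
  set b := swapA a p q with hb
  have ea : segm a l h = segm a l p ++ idxA a p :: (segm a (p+1) q ++ idxA a q :: segm a (q+1) h) := by
    rw [segm_append a (l := l) (m := p) (h := h) hlp (by omega),
        segm_cons a (show p < h by omega),
        segm_append a (l := p+1) (m := q) (h := h) (by omega) (by omega),
        segm_cons a hqh]
  have eb : segm b l h = segm a l p ++ idxA a q :: (segm a (p+1) q ++ idxA a p :: segm a (q+1) h) := by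
    rw [segm_append b (l := l) (m := p) (h := h) hlp (by omega),
        segm_cons b (show p < h by omega),
        segm_append b (l := p+1) (m := q) (h := h) (by omega) (by omega),
        segm_cons b hqh]
    have c1 : segm b l p = segm a l p := segm_congr (fun k h1 h2 => by
      rw [hsw k (by omega)]; rw [if_neg (by omega), if_neg (by omega)])
    have c2 : segm b (p+1) q = segm a (p+1) q := segm_congr (fun k h1 h2 => by
      rw [hsw k (by omega)]; rw [if_neg (by omega), if_neg (by omega)])
    have c3 : segm b (q+1) h = segm a (q+1) h := segm_congr (fun k h1 h2 => by
      rw [hsw k (by omega)]; rw [if_neg (by omega), if_neg (by omega)])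
    have c4 : idxA b p = idxA a q := by rw [hsw p (by omega)]; rw [if_pos rfl]
    have c5 : idxA b q = idxA a p := by rw [hsw q (by omega)]; rw [if_neg (by omega), if_pos rfl]
    rw [c1, c2, c3, c4, c5]
  rw [ea, eb]
  apply List.Perm.append_left
  exact List.Perm.trans (List.Perm.cons _ List.perm_middle)
    (List.Perm.trans (List.Perm.swap _ _ _) (List.Perm.cons _ List.perm_middle.symm))

theorem swap_segm_perm (a : List Int) (p q l h : Int)
    (hl0 : 0 ≤ l) (hlp : l ≤ p) (hph : p < h) (hlq : l ≤ q) (hqh : q < h)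
    (hh : h ≤ (a.length : Int)) : (segm (swapA a p q) l h).Perm (segm a l h) := by
  have hp' : p < (a.length : Int) := lt_of_lt_of_le hph hh
  have hq' : q < (a.length : Int) := lt_of_lt_of_le hqh hh
  have hsw := fun k hk => idxA_swap a p q k (by omega) hp' (by omega) hq' hk
  rcases lt_trichotomy p q with hpq | hpq | hpq
  · exact swap_segm_perm_aux a p q l h hl0 hlp hlq hqh hh hpq
  · have e : segm (swapA a p q) l h = segm a l h := by
      apply segm_congr
      intro k hk1 hk2
      rw [hsw k (by omega)]
      split_ifs <;> simp_all
    rw [e]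
  · have e : segm (swapA a p q) l h = segm (swapA a q p) l h := by
      apply segm_congr
      intro k hk1 hk2
      rw [hsw k (by omega), idxA_swap a q p k (by omega) hq' (by omega) hp' (by omega)]
      split_ifs <;> simp_all
    rw [e]
    exact swap_segm_perm_aux a q p l h hl0 hlq hlp hph hh hpq

-- ---- partition correctness ----
theorem ploop_base (piv : Int) (a : List Int) (i j high : Int)
    (hle : high ≤ j)
    (hpre : ∀ k : Int, i ≤ k → k < j → piv ≤ idxA a k) :
    ((((PySem.List.pyRange j high 1).foldl (pstep piv) (a, i)).1.length = a.length) ∧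
     (∀ k : Int, 0 ≤ k → (k < i ∨ high ≤ k) →
        idxA ((PySem.List.pyRange j high 1).foldl (pstep piv) (a, i)).1 k = idxA a k) ∧
     (segm ((PySem.List.pyRange j high 1).foldl (pstep piv) (a, i)).1 i high).Perm (segm a i high) ∧
     (∀ k : Int, i ≤ k → k < ((PySem.List.pyRange j high 1).foldl (pstep piv) (a, i)).2 →
        idxA ((PySem.List.pyRange j high 1).foldl (pstep piv) (a, i)).1 k < piv) ∧
     (∀ k : Int, ((PySem.List.pyRange j high 1).foldl (pstep piv) (a, i)).2 ≤ k → k < high →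
        piv ≤ idxA ((PySem.List.pyRange j high 1).foldl (pstep piv) (a, i)).1 k)) := by
  rw [PySem.List.pyRange_one_eq_nil hle]
  refine ⟨rfl, fun k _ _ => rfl, List.Perm.refl _, ?_, ?_⟩
  · intro k hk1 hk2
    simp only [List.foldl_nil] at hk1 hk2
    omega
  · intro k hk1 hk2
    simp only [List.foldl_nil] at hk1 ⊢
    exact hpre k hk1 (by omega)

theorem ploop_spec (piv : Int) : ∀ (n : Nat) (a : List Int) (i j high : Int),
    (high - j).toNat = n → 0 ≤ i → i ≤ j → high ≤ (a.length : Int) →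
    (∀ k : Int, i ≤ k → k < j → piv ≤ idxA a k) →
    ((((PySem.List.pyRange j high 1).foldl (pstep piv) (a, i)).1.length = a.length) ∧
     (∀ k : Int, 0 ≤ k → (k < i ∨ high ≤ k) →
        idxA ((PySem.List.pyRange j high 1).foldl (pstep piv) (a, i)).1 k = idxA a k) ∧
     (segm ((PySem.List.pyRange j high 1).foldl (pstep piv) (a, i)).1 i high).Perm (segm a i high) ∧
     (∀ k : Int, i ≤ k → k < ((PySem.List.pyRange j high 1).foldl (pstep piv) (a, i)).2 →
        idxA ((PySem.List.pyRange j high 1).foldl (pstep piv) (a, i)).1 k < piv) ∧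
     (∀ k : Int, ((PySem.List.pyRange j high 1).foldl (pstep piv) (a, i)).2 ≤ k → k < high →
        piv ≤ idxA ((PySem.List.pyRange j high 1).foldl (pstep piv) (a, i)).1 k)) := by
  intro n
  induction n with
  | zero =>
    intro a i j high hn h0i hij hlen hpre
    exact ploop_base piv a i j high (by omega) hpre
  | succ m ih =>
    intro a i j high hn h0i hij hlen hpre
    by_cases hlt : j < high
    · rw [PySem.List.pyRange_one_cons hlt]
      simp only [List.foldl_cons]
      by_cases hcmp : idxA a j < piv
      · have hstep : pstep piv (a, i) j = (swapA a j i, i + 1) := by simp [pstep, hcmp]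
        rw [hstep]
        have hlen' : (swapA a j i).length = a.length := length_swapA a j i
        have hswp := fun k hk => idxA_swap a j i k (by omega) (by omega) (by omega) (by omega) hk
        have hpre' : ∀ k : Int, i + 1 ≤ k → k < j + 1 → piv ≤ idxA (swapA a j i) k := by
          intro k hk1 hk2
          rw [hswp k (by omega)]
          by_cases hkj : k = j
          · rw [if_pos hkj]
            exact hpre i le_rfl (by omega)
          · rw [if_neg hkj, if_neg (by omega)]
            exact hpre k (by omega) (by omega)
        obtain ⟨L1, L3, L4, L5, L6⟩ :=
          ih (swapA a j i) (i + 1) (j + 1) high (by omega) (by omega) (by omega)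
            (by rw [hlen']; exact hlen) hpre'
        refine ⟨by rw [L1, hlen'], ?_, ?_, ?_, L6⟩
        · intro k hk hor
          rw [L3 k hk (by omega)]
          rw [hswp k hk, if_neg (by omega), if_neg (by omega)]
        · have hih : i < high := by omega
          have e1 : idxA ((PySem.List.pyRange (j+1) high 1).foldl (pstep piv) (swapA a j i, i + 1)).1 i
              = idxA (swapA a j i) i := L3 i (by omega) (by omega)
          have s1 : segm ((PySem.List.pyRange (j+1) high 1).foldl (pstep piv) (swapA a j i, i + 1)).1 i high
              = idxA (swapA a j i) i
                :: segm ((PySem.List.pyRange (j+1) high 1).foldl (pstep piv) (swapA a j i, i + 1)).1 (i+1) high := by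
            rw [segm_cons _ hih, e1]
          have t1 : (segm ((PySem.List.pyRange (j+1) high 1).foldl (pstep piv) (swapA a j i, i + 1)).1 i high).Perm
              (segm (swapA a j i) i high) := by
            rw [s1, segm_cons _ hih]
            exact List.Perm.cons _ L4
          exact t1.trans (swap_segm_perm a j i i high (by omega) (by omega) (by omega) (by omega) (by omega) hlen)
        · intro k hk1 hk2
          rcases eq_or_lt_of_le hk1 with heq | hlt2
          · subst heq
            have e1 := L3 i (by omega) (by omega)
            rw [e1]
            have e2 : idxA (swapA a j i) i = idxA a j := by
              rw [hswp i (by omega)]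
              by_cases hij' : i = j
              · rw [if_pos hij', hij']
              · rw [if_neg hij', if_pos rfl]
            rw [e2]
            exact hcmp
          · exact L5 k (by omega) hk2
      · have hstep : pstep piv (a, i) j = (a, i) := by simp [pstep, hcmp]
        rw [hstep]
        have hpre' : ∀ k : Int, i ≤ k → k < j + 1 → piv ≤ idxA a k := by
          intro k hk1 hk2
          by_cases hkj : k = j
          · subst hkj; omega
          · exact hpre k hk1 (by omega)
        exact ih a i (j + 1) high (by omega) h0i (by omega) hlen hpre'
    · exact ploop_base piv a i j high (by omega) hpre

theorem partition_spec (a : List Int) (low high : Int)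
    (h0 : 0 ≤ low) (hlh : low < high) (hh : high < (a.length : Int)) :
    ((partitionA a low high).1.length = a.length ∧
     (low ≤ (partitionA a low high).2 ∧ (partitionA a low high).2 ≤ high) ∧
     (∀ k, 0 ≤ k → (k < low ∨ high < k) → idxA (partitionA a low high).1 k = idxA a k) ∧
     (segm (partitionA a low high).1 low (high + 1)).Perm (segm a low (high + 1)) ∧
     (∀ k, low ≤ k → k < (partitionA a low high).2 → idxA (partitionA a low high).1 k < idxA a high) ∧
     idxA (partitionA a low high).1 (partitionA a low high).2 = idxA a high ∧
     (∀ k, (partitionA a low high).2 < k → k ≤ high → idxA a high ≤ idxA (partitionA a low high).1 k)) := by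
  have hb := partition_i_bounds a low high
  obtain ⟨hblo, hbhi⟩ := hb
  have hpihigh : (partitionA a low high).2 ≤ high := by omega
  obtain ⟨P1, P3, P4, P5, P6⟩ :=
    ploop_spec (idxA a high) (high - low).toNat a low low high rfl h0 le_rfl (by omega)
      (fun k hk1 hk2 => absurd hk2 (by omega))
  simp only [partitionA] at hblo hpihigh ⊢
  set st := (PySem.List.pyRange low high 1).foldl (pstep (idxA a high)) (a, low) with hst
  have hlenb : st.1.length = a.length := P1
  have hswc := fun k hk => idxA_swap st.1 st.2 high k (by omega) (by rw [hlenb] at *; omega) (by omega)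
      (by rw [hlenb] at *; omega) hk
  have hbh : idxA st.1 high = idxA a high := P3 high (by omega) (Or.inr le_rfl)
  refine ⟨by rw [length_swapA, hlenb], ⟨hblo, hpihigh⟩, ?_, ?_, ?_, ?_, ?_⟩
  · intro k hk hor
    rw [hswc k hk, if_neg (by omega), if_neg (by omega)]
    exact P3 k hk (by omega)
  · have t1 : (segm (swapA st.1 st.2 high) low (high + 1)).Perm (segm st.1 low (high + 1)) :=
      swap_segm_perm st.1 st.2 high low (high + 1) (by omega) (by omega) (by omega)
        (by omega) (by omega) (by rw [hlenb]; omega)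
    have t2 : segm st.1 low (high + 1) = segm st.1 low high ++ [idxA a high] := by
      rw [segm_snoc _ (by omega), hbh]
    have t3 : segm a low (high + 1) = segm a low high ++ [idxA a high] := segm_snoc _ (by omega)
    refine t1.trans ?_
    rw [t2, t3]
    exact List.Perm.append_right _ P4
  · intro k hk1 hk2
    rw [hswc k (by omega), if_neg (by omega), if_neg (by omega)]
    exact P5 k hk1 hk2
  · rw [hswc st.2 (by omega), if_pos rfl]
    exact hbh
  · intro k hk1 hk2
    rcases eq_or_lt_of_le hk2 with heq | hlt2
    · subst heq
      rw [hswc k (by omega)]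
      by_cases hpe : k = st.2
      · rw [if_pos hpe]
        rw [hbh]
      · rw [if_neg hpe, if_pos rfl]
        exact P6 st.2 le_rfl (by omega)
    · rw [hswc k (by omega), if_neg (by omega), if_neg (by omega)]
      exact P6 k (by omega) (by omega)

-- ---- quicksort correctness ----
theorem idxA_coe (a : List Int) (n : Nat) (hn : n < a.length) : idxA a (n : Int) = a[n] := by
  rw [idxA_nonneg_getD _ _ (by positivity)]
  simp [hn]

theorem qs_spec : ∀ (n : Nat) (a : List Int) (low high : Int),
    (high - low + 1).toNat ≤ n → 0 ≤ low → high < (a.length : Int) →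
    ((quickSortA a low high).length = a.length ∧
     (∀ k, 0 ≤ k → (k < low ∨ high < k) → idxA (quickSortA a low high) k = idxA a k) ∧
     (segm (quickSortA a low high) low (high + 1)).Perm (segm a low (high + 1)) ∧
     (∀ p q, low ≤ p → p ≤ q → q ≤ high →
        idxA (quickSortA a low high) p ≤ idxA (quickSortA a low high) q)) := by
  intro n
  induction n with
  | zero =>
    intro a low high hn h0 hh
    rw [quickSortA, dif_neg (by omega : ¬ low < high)]
    refine ⟨rfl, fun k _ _ => rfl, List.Perm.refl _, ?_⟩
    intro p q h1 h2 h3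
    have hpq : p = q := by omega
    subst hpq; exact le_rfl
  | succ m ih =>
    intro a low high hn h0 hh
    by_cases hlh : low < high
    · have hrw : quickSortA a low high =
          quickSortA (quickSortA (partitionA a low high).1 low ((partitionA a low high).2 - 1))
            ((partitionA a low high).2 + 1) high := by
        rw [quickSortA]
        simp [hlh]
      obtain ⟨Q1, ⟨Qlo, Qhi⟩, Q3, Q4, Q5, Q6, Q7⟩ := partition_spec a low high h0 hlh hh
      rw [hrw]
      set pi := (partitionA a low high).2 with hpi
      set c := (partitionA a low high).1 with hc
      obtain ⟨L1, L2, L3, L4⟩ := ih c low (pi - 1) (by omega) h0 (by rw [show ((c.length : Nat) : Int) = (a.length : Int) from by exact_mod_cast Q1]; omega)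
      set d := quickSortA c low (pi - 1) with hd
      have hdlen : d.length = a.length := by rw [L1, Q1]
      obtain ⟨R1, R2, R3, R4⟩ := ih d (pi + 1) high (by omega) (by omega) (by rw [show ((d.length : Nat) : Int) = (a.length : Int) from by exact_mod_cast hdlen]; exact hh)
      set e := quickSortA d (pi + 1) high with he
      have hL3' : (segm d low pi).Perm (segm c low pi) := by
        have h := L3
        rw [show pi - 1 + 1 = pi from by ring] at h
        exact h
      have hepi : idxA e pi = idxA a high := by
        rw [R2 pi (by omega) (by omega), L2 pi (by omega) (by omega)]
        exact Q6
      have hlt : ∀ k, low ≤ k → k < pi → idxA e k < idxA a high := by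
        intro k h1 h2
        rw [R2 k (by omega) (by omega)]
        have hm : idxA d k ∈ segm d low pi := mem_segm.mpr ⟨k, ⟨h1, h2⟩, rfl⟩
        have hm2 : idxA d k ∈ segm c low pi := hL3'.mem_iff.mp hm
        obtain ⟨k', hk', he'⟩ := mem_segm.mp hm2
        rw [← he']
        exact Q5 k' hk'.1 hk'.2
      have hge : ∀ k, pi < k → k ≤ high → idxA a high ≤ idxA e k := by
        intro k h1 h2
        have hm : idxA e k ∈ segm e (pi + 1) (high + 1) := mem_segm.mpr ⟨k, ⟨by omega, by omega⟩, rfl⟩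
        have hm2 : idxA e k ∈ segm d (pi + 1) (high + 1) := R3.mem_iff.mp hm
        obtain ⟨k', hk', he'⟩ := mem_segm.mp hm2
        rw [← he', L2 k' (by omega) (by omega)]
        exact Q7 k' (by omega) (by omega)
      refine ⟨R1.trans hdlen, ?_, ?_, ?_⟩
      · intro k hk hor
        rw [R2 k hk (by omega), L2 k hk (by omega), Q3 k hk hor]
      · have hA3 : segm e low (pi + 1) = segm d low (pi + 1) :=
          segm_congr (fun k h1 h2 => R2 k (by omega) (by omega))
        have pe : (segm e low (high + 1)).Perm (segm d low (high + 1)) := by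
          rw [segm_append e (l := low) (m := pi + 1) (h := high + 1) (by omega) (by omega),
              segm_append d (l := low) (m := pi + 1) (h := high + 1) (by omega) (by omega), hA3]
          exact List.Perm.append_left _ R3
        have hB3 : segm d pi (high + 1) = segm c pi (high + 1) :=
          segm_congr (fun k h1 h2 => L2 k (by omega) (by omega))
        have pd : (segm d low (high + 1)).Perm (segm c low (high + 1)) := by
          rw [segm_append d (l := low) (m := pi) (h := high + 1) (by omega) (by omega),
              segm_append c (l := low) (m := pi) (h := high + 1) (by omega) (by omega), hB3]
          exact List.Perm.append_right _ hL3'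
        exact (pe.trans pd).trans Q4
      · intro p q h1 h2 h3
        rcases lt_trichotomy q pi with hq | hq | hq
        · rw [R2 p (by omega) (by omega), R2 q (by omega) (by omega)]
          exact L4 p q h1 h2 (by omega)
        · rcases eq_or_lt_of_le h2 with hpq | hpq
          · subst hpq; exact le_rfl
          · rw [hq, hepi]
            exact le_of_lt (hlt p h1 (by omega))
        · rcases lt_trichotomy p pi with hp | hp | hp
          · exact le_trans (le_of_lt (hlt p h1 hp)) (hge q hq h3)
          · rw [hp, hepi]
            exact hge q hq h3
          · exact R4 p q (by omega) h2 h3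
    · rw [quickSortA, dif_neg hlh]
      refine ⟨rfl, fun k _ _ => rfl, List.Perm.refl _, ?_⟩
      intro p q h1 h2 h3
      have hpq : p = q := by omega
      subst hpq; exact le_rfl

theorem qs_eq_sorted (arr : List Int) :
    quickSortA arr 0 ((arr.length : Int) - 1) = PySem.List.sorted arr (fun x => x) false := by
  obtain ⟨H1, H2, H3, H4⟩ :=
    qs_spec arr.length arr 0 ((arr.length : Int) - 1) (by omega) le_rfl (by omega)
  set b := quickSortA arr 0 ((arr.length : Int) - 1) with hb
  rw [show ((arr.length : Int) - 1) + 1 = (arr.length : Int) from by ring] at H3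
  have hperm : b.Perm arr := by
    have e1 : segm b 0 (arr.length : Int) = b := by
      have h := segm_full b
      rw [show ((b.length : Nat) : Int) = (arr.length : Int) from by exact_mod_cast H1] at h
      exact h
    rw [e1, segm_full arr] at H3
    exact H3
  have hpw : b.Pairwise (· ≤ ·) := by
    rw [List.pairwise_iff_getElem]
    intro u v hu hv huv
    have hv' : v < arr.length := H1 ▸ hv
    have h4 := H4 (u : Int) (v : Int) (by positivity) (by exact_mod_cast le_of_lt huv) (by omega)
    rwa [idxA_coe b u hu, idxA_coe b v hv] at h4
  exact (PySem.List.sorted_id_eq_of_perm_of_pairwise arr b hperm hpw).symm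

-- ---- the grouping scan, reduced to a fold over the completed groups ----
-- completed (value, count) groups of a list, given the pending run (v, c); the final run is dropped
def groupsFrom (v c : Int) : List Int → List (Int × Int)
  | [] => []
  | x :: t => if v = x then groupsFrom v (c + 1) t else (v, c) :: groupsFrom x 1 t

def upd (st : Option Int × Int) (g : Int × Int) : Option Int × Int :=
  if g.2 < st.2 then (some g.1, g.2) else st

-- what A computes from the sorted list
def scanFull : List Int → Option Int × Int
  | [] => (none, 9999)
  | x :: t => (groupsFrom x 1 t).foldl upd (some x, 9999)

theorem scan_fold : ∀ (t : List Int) (p : Option Int) (v c h : Int),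
    ((t.foldl sstep (p, some v, c, h)).1, (t.foldl sstep (p, some v, c, h)).2.2.2) =
      (groupsFrom v c t).foldl upd (p, h) := by
  intro t
  induction t with
  | nil => intro p v c h; simp [groupsFrom]
  | cons x t ih =>
    intro p v c h
    by_cases hvx : v = x
    · simp [sstep, groupsFrom, hvx, ih]
    · by_cases hch : c < h
      · simp [sstep, groupsFrom, hvx, hch, ih, upd]
      · simp [sstep, groupsFrom, hvx, hch, ih, upd]

theorem A_eq_scanFull (arr : List Int) :
    leastElementFromSortedArray arr = scanFull (PySem.List.sorted arr (fun x => x) false) := by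
  simp only [leastElementFromSortedArray]
  rw [qs_eq_sorted arr]
  set s := PySem.List.sorted arr (fun x => x) false with hs
  rw [PySem.List.foldl_pyRange_zero_pyGetD' s 0 sstep (none, none, 0, 9999)]
  cases s with
  | nil => rfl
  | cons x t =>
    rw [List.foldl_cons, show sstep (none, none, 0, 9999) x = (some x, some x, 1, 9999) from by simp [sstep]]
    exact scan_fold t (some x) x 1 9999

-- ---- adjacent dedup: the distinct values of a sorted list, in order ----
def dd : List Int → List Int
  | [] => []
  | [x] => [x]
  | x :: y :: t => if x = y then dd (y :: t) else x :: dd (y :: t)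

theorem dd_ne_nil (x : Int) (l : List Int) : dd (x :: l) ≠ [] := by
  induction l generalizing x with
  | nil => simp [dd]
  | cons y t ih =>
    simp only [dd]
    split
    · exact ih y
    · simp

theorem mem_dd : ∀ (l : List Int) (y : Int), y ∈ dd l ↔ y ∈ l := by
  intro l
  induction l with
  | nil => simp [dd]
  | cons x t ih =>
    intro y
    cases t with
    | nil => simp [dd]
    | cons z t2 =>
      simp only [dd]
      split
      · next hxz => rw [ih y, hxz]; simp
      · simp [List.mem_cons, ih y]

theorem dd_pairwise_lt : ∀ (l : List Int), l.Pairwise (· ≤ ·) → (dd l).Pairwise (· < ·) := by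
  intro l
  induction l with
  | nil => simp [dd]
  | cons x t ih =>
    intro hp
    cases t with
    | nil => simp [dd]
    | cons z t2 =>
      have hp' : (z :: t2).Pairwise (· ≤ ·) := hp.of_cons
      have hxall : ∀ y ∈ z :: t2, x ≤ y := fun y hy => List.rel_of_pairwise_cons hp hy
      simp only [dd]
      split
      · exact ih hp'
      · next hxz =>
        refine List.pairwise_cons.mpr ⟨?_, ih hp'⟩
        intro y hy
        have hyz : y ∈ z :: t2 := (mem_dd _ y).mp hy
        have hxy : x ≤ y := hxall y hyz
        cases List.mem_cons.mp hyz with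
        | inl h => omega
        | inr h =>
          have h1 : x ≤ z := hxall z (List.mem_cons_self)
          have h2 : z ≤ y := List.rel_of_pairwise_cons hp' h
          omega

theorem groupsFrom_eq_map_dd : ∀ (t : List Int) (v c : Int),
    (∀ y ∈ t, v ≤ y) → t.Pairwise (· ≤ ·) →
    groupsFrom v c t = (dd (v :: t)).dropLast.map
      (fun k => (k, if k = v then c + (t.count v : Int) else (t.count k : Int))) := by
  intro t
  induction t with
  | nil => intro v c _ _; simp [groupsFrom, dd]
  | cons x t ih =>
    intro v c hall hp
    by_cases hvx : v = x
    · subst hvx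
      rw [show groupsFrom v c (v :: t) = groupsFrom v (c + 1) t from by simp [groupsFrom]]
      rw [show dd (v :: v :: t) = dd (v :: t) from by simp [dd]]
      rw [ih v (c + 1) (fun y hy => hall y (List.mem_cons_of_mem _ hy)) hp.of_cons]
      apply List.map_congr_left
      intro k hk
      by_cases hkv : k = v
      · subst hkv
        simp only [List.count_cons_self]
        push_cast
        ring_nf
      · have hvk : ¬ v = k := fun h => hkv h.symm
        simp [hkv, hvk]
    · have hvltx : v < x := lt_of_le_of_ne (hall x List.mem_cons_self) hvx
      have hddne := dd_ne_nil x t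
      rw [show groupsFrom v c (x :: t) = (v, c) :: groupsFrom x 1 t from by simp [groupsFrom, hvx]]
      rw [show dd (v :: x :: t) = v :: dd (x :: t) from by simp [dd, hvx]]
      rw [List.dropLast_cons_of_ne_nil hddne, List.map_cons]
      congr 1
      · have hvnot : v ∉ x :: t := by
          intro hvm
          cases List.mem_cons.mp hvm with
          | inl h => exact hvx h
          | inr h => exact absurd (List.rel_of_pairwise_cons hp h) (by omega)
        simp [List.count_eq_zero.mpr hvnot]
      · rw [ih x 1 (fun y hy => List.rel_of_pairwise_cons hp hy) hp.of_cons]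
        apply List.map_congr_left
        intro k hk
        have hkmem : k ∈ x :: t := (mem_dd _ k).mp ((List.dropLast_sublist _).subset hk)
        have hkx : x ≤ k := by
          cases List.mem_cons.mp hkmem with
          | inl h => omega
          | inr h => exact List.rel_of_pairwise_cons hp h
        have hkv : ¬ k = v := by omega
        by_cases hkx' : k = x
        · subst hkx'
          simp only [if_neg hkv, List.count_cons_self]
          push_cast
          ring_nf
        · have hxk' : ¬ x = k := fun h => hkx' h.symm
          simp [hkx', hkv, hxk']

-- clean form: the completed groups carry the count in the whole sorted list
theorem groupsFrom_eq_counts (x : Int) (t : List Int)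
    (hall : ∀ y ∈ t, x ≤ y) (hp : t.Pairwise (· ≤ ·)) :
    groupsFrom x 1 t = (dd (x :: t)).dropLast.map (fun k => (k, ((x :: t).count k : Int))) := by
  rw [groupsFrom_eq_map_dd t x 1 hall hp]
  apply List.map_congr_left
  intro k hk
  by_cases hkx : k = x
  · subst hkx
    simp only [if_pos rfl, List.count_cons_self]
    push_cast
    ring_nf
  · have hxk : ¬ x = k := fun h => hkx h.symm
    simp [hkx, hxk]

-- ---- A's fold over the completed groups is a first-strict-min selection ----
def selMin (b : Int × Int) : List (Int × Int) → Int × Int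
  | [] => b
  | p :: t => if p.2 < b.2 then selMin p t else selMin b t

theorem fold_upd_selMin : ∀ (ps : List (Int × Int)) (b : Int × Int),
    ps.foldl upd (some b.1, b.2) = (some (selMin b ps).1, (selMin b ps).2) := by
  intro ps
  induction ps with
  | nil => intro b; simp [selMin]
  | cons p t ih =>
    intro b
    by_cases hpb : p.2 < b.2
    · simp [upd, selMin, hpb, ih p]
    · simp [upd, selMin, hpb, ih b]

theorem selMin_keep : ∀ (ps : List (Int × Int)) (b : Int × Int),
    (∀ p ∈ ps, b.2 ≤ p.2) → selMin b ps = b := by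
  intro ps
  induction ps with
  | nil => intro b _; rfl
  | cons p t ih =>
    intro b hall
    have h1 : ¬ p.2 < b.2 := by have := hall p List.mem_cons_self; omega
    simp only [selMin, if_neg h1]
    exact ih b (fun r hr => hall r (List.mem_cons_of_mem _ hr))

theorem selMin_attains : ∀ (ps : List (Int × Int)) (b q : Int × Int),
    q ∈ ps → (∀ p ∈ ps, p ≠ q → q.2 < p.2 ∨ (q.2 = p.2 ∧ q.1 < p.1)) → q.2 < b.2 →
    ps.Pairwise (fun a c => a.1 < c.1) → selMin b ps = q := by
  intro ps
  induction ps with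
  | nil => intro b q hq; exact absurd hq (List.not_mem_nil)
  | cons p t ih =>
    intro b q hq hall hqb hpw
    by_cases hpq : p = q
    · subst hpq
      simp only [selMin, if_pos hqb]
      apply selMin_keep
      intro r hr
      by_cases hrp : r = p
      · subst hrp; exact le_rfl
      · have := hall r (List.mem_cons_of_mem _ hr) hrp
        omega
    · have hqt : q ∈ t := by
        rcases List.mem_cons.mp hq with h | h
        · exact absurd h (by intro hh; exact hpq hh.symm)
        · exact h
      have hpfst : p.1 < q.1 := List.rel_of_pairwise_cons hpw hqt
      have hqp : q.2 < p.2 := by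
        have := hall p List.mem_cons_self hpq
        omega
      simp only [selMin]
      split
      · exact ih p q hqt (fun r hr hrq => hall r (List.mem_cons_of_mem _ hr) hrq) hqp hpw.of_cons
      · exact ih b q hqt (fun r hr hrq => hall r (List.mem_cons_of_mem _ hr) hrq) hqb hpw.of_cons

-- ---- B's min(keys, key=lambda k: (counts[k], k)) as a recursive first-lex-min selection ----
def selLex (k1 : Int → Int) (m : Int) : List Int → Int
  | [] => m
  | x :: t => if k1 x < k1 m ∨ (¬ k1 m < k1 x ∧ x < m) then selLex k1 x t else selLex k1 m t

theorem min2_fold_aux (k1 : Int → Int) (f : Option Int → Int → Option Int)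
    (hf : ∀ m y, f (some m) y = if k1 y < k1 m ∨ (¬ k1 m < k1 y ∧ y < m) then some y else some m) :
    ∀ (t : List Int) (m : Int), t.foldl f (some m) = some (selLex k1 m t) := by
  intro t
  induction t with
  | nil => intro m; simp [selLex]
  | cons y t ih =>
    intro m
    rw [List.foldl_cons, hf]
    by_cases hc : k1 y < k1 m ∨ (¬ k1 m < k1 y ∧ y < m)
    · rw [if_pos hc]
      simp only [selLex, if_pos hc]
      exact ih y
    · rw [if_neg hc]
      simp only [selLex, if_neg hc]
      exact ih m

theorem min2_cons (k1 : Int → Int) (x : Int) (t : List Int) :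
    PySem.List.min2? (x :: t) k1 (fun k => k) = some (selLex k1 x t) := by
  simp only [PySem.List.min2?, List.foldl_cons]
  refine min2_fold_aux k1 _ ?_ t x
  intro m y
  by_cases h1 : k1 y < k1 m
  · simp [h1]
  · by_cases h2 : k1 m < k1 y
    · simp [h1, h2]
    · by_cases h3 : y < m
      · simp [h1, h2, h3]
      · simp [h1, h2, h3]

theorem selLex_mem (k1 : Int → Int) : ∀ (t : List Int) (m : Int), selLex k1 m t = m ∨ selLex k1 m t ∈ t := by
  intro t
  induction t with
  | nil => intro m; left; rfl
  | cons x t ih =>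
    intro m
    simp only [selLex]
    split
    · rcases ih x with h | h
      · right; rw [h]; exact List.mem_cons_self
      · right; exact List.mem_cons_of_mem _ h
    · rcases ih m with h | h
      · left; exact h
      · right; exact List.mem_cons_of_mem _ h

-- the selected element is lex-minimal among the initial element and the list
theorem selLex_min (k1 : Int → Int) : ∀ (t : List Int) (m y : Int), (y = m ∨ y ∈ t) →
    ¬ (k1 y < k1 (selLex k1 m t) ∨ (k1 y = k1 (selLex k1 m t) ∧ y < selLex k1 m t)) := by
  intro t
  induction t with
  | nil =>
    intro m y hy
    rcases hy with h | h
    · subst h; simp only [selLex]; omega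
    · exact absurd h (List.not_mem_nil)
  | cons x t ih =>
    intro m y hy
    simp only [selLex]
    by_cases hc : k1 x < k1 m ∨ (¬ k1 m < k1 x ∧ x < m)
    · rw [if_pos hc]
      rcases hy with h | h
      · -- y = m: m is lex-above x, and the result is lex-minimal over x :: t
        subst h
        have hxr := ih x x (Or.inl rfl)
        intro hcon
        omega
      · rcases List.mem_cons.mp h with h2 | h2
        · rw [h2]; exact ih x x (Or.inl rfl)
        · exact ih x y (Or.inr h2)
    · rw [if_neg hc]
      rcases hy with h | h
      · exact ih m y (Or.inl h)
      · rcases List.mem_cons.mp h with h2 | h2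
        · -- y = x lost against m, and the result is lex-minimal over m :: t
          have hmr := ih m m (Or.inl rfl)
          rw [h2]
          intro hcon
          omega
        · exact ih m y (Or.inr h2)

-- ---- facts about the maximum used by D_ ----
theorem max_spec (x : Int) (t : List Int) :
    (x :: t).foldl max ((x :: t).headD 0) ∈ (x :: t) ∧
      ∀ y ∈ (x :: t), y ≤ (x :: t).foldl max ((x :: t).headD 0) := by
  have he : (x :: t).foldl max ((x :: t).headD 0) = t.foldl max x := by
    simp
  rw [he]
  obtain ⟨h1, h2⟩ := PySem.List.le_foldl_max t x
  refine ⟨?_, ?_⟩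
  · rcases PySem.List.foldl_max_mem t x with h | h
    · rw [h]; exact List.mem_cons_self
    · exact List.mem_cons_of_mem _ h
  · intro y hy
    rcases List.mem_cons.mp hy with h | h
    · omega
    · exact h2 y h

theorem le_getLast_of_pairwise_lt : ∀ (l : List Int) (h : l ≠ []),
    l.Pairwise (· < ·) → ∀ x ∈ l, x ≤ l.getLast h := by
  intro l
  induction l with
  | nil => intro h; exact absurd rfl h
  | cons a t ih =>
    intro h hpw x hx
    cases t with
    | nil =>
      simp only [List.getLast_singleton]
      rcases List.mem_cons.mp hx with h1 | h1
      · omega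
      · exact absurd h1 (List.not_mem_nil)
    | cons b t2 =>
      rw [List.getLast_cons (by simp)]
      rcases List.mem_cons.mp hx with h1 | h1
      · subst h1
        have hb := List.getLast_mem (l := b :: t2) (by simp)
        have := List.rel_of_pairwise_cons hpw hb
        omega
      · exact ih (by simp) hpw.of_cons x h1

theorem mem_dropLast_of_ne_getLast (l : List Int) (h : l ≠ []) (x : Int)
    (hx : x ∈ l) (hne : x ≠ l.getLast h) : x ∈ l.dropLast := by
  have hsplit := List.dropLast_append_getLast h
  rw [← hsplit] at hx
  rcases List.mem_append.mp hx with h1 | h1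
  · exact h1
  · exact absurd (List.mem_singleton.mp h1) hne

-- ---- the main equivalence outside D_ ----
theorem unchanged_main (arr : List Int) (hne : arr ≠ [])
    (hnd : ¬ D_leastElementFromSortedArray arr) :
    leastElementFromSortedArray arr = leastElementFromSortedArray_alt arr := by
  -- B's side: counts, keys, and the selected value v
  have hkeys : (PySem.Dict.counter arr).keys = PySem.Set.ofList arr := PySem.Dict.keys_counter arr
  obtain ⟨x0, t0, hs0⟩ := List.exists_cons_of_ne_nil hne
  have hkne : PySem.Set.ofList arr ≠ [] := by
    intro hempty
    have := (PySem.Set.mem_ofList arr x0).mpr (by rw [hs0]; exact List.mem_cons_self)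
    rw [hempty] at this
    exact absurd this (List.not_mem_nil)
  obtain ⟨km, kt, hkcons⟩ := List.exists_cons_of_ne_nil hkne
  set c : Int → Int := fun k => (PySem.Dict.counter arr).getD k 0 with hc
  set v := selLex c km kt with hv
  have halt : leastElementFromSortedArray_alt arr = (some v, (arr.count v : Int)) := by
    simp only [leastElementFromSortedArray_alt, PySem.Dict.foldl_insert_getD_add_one_eq_counter,
      hkeys, hkcons, min2_cons]
    rw [← hc, ← hv, PySem.Dict.getD_counter]
  have hvmem : v ∈ arr := by
    rcases selLex_mem c kt km with h | h
    · rw [← (PySem.Set.mem_ofList arr v), hkcons]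
      rw [hv, h]
      exact List.mem_cons_self
    · rw [← (PySem.Set.mem_ofList arr v), hkcons]
      exact List.mem_cons_of_mem _ h
  -- lex-minimality of v over all values of arr
  have hvmin : ∀ y ∈ arr, ¬ ((arr.count y : Int) < (arr.count v : Int) ∨
      ((arr.count y : Int) = (arr.count v : Int) ∧ y < v)) := by
    intro y hy
    have hky : y = km ∨ y ∈ kt := by
      have := (PySem.Set.mem_ofList arr y).mpr hy
      rw [hkcons] at this
      exact List.mem_cons.mp this
    have := selLex_min c kt km y hky
    rw [← hv] at this
    simpa only [hc, PySem.Dict.getD_counter] using this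
  -- the maximum and the two ¬D_ witnesses
  set M := arr.foldl max (arr.headD 0) with hM
  have hMs := max_spec x0 t0
  rw [← hs0] at hMs
  rw [← hM] at hMs
  obtain ⟨hMmem, hMmax⟩ := hMs
  rw [D_leastElementFromSortedArray] at hnd
  push_neg at hnd
  obtain ⟨⟨w2, hw2m, hw2ne, hw2le⟩, ⟨w3, hw3m, hw3ne, hw3lt⟩⟩ := hnd hne
  rw [← hM] at hw2ne hw2le hw3ne
  have hw2le' : arr.count w2 ≤ arr.count M := by omega
  -- v is not the maximum
  have hvneM : v ≠ M := by
    intro hveq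
    have h1 := hvmin w2 hw2m
    have h2 : arr.count w2 = arr.count v := by
      rw [hveq] at h1 ⊢
      omega
    have h3 : ¬ w2 < v := by
      intro h4
      exact h1 (Or.inr ⟨by exact_mod_cast h2, h4⟩)
    have h5 : w2 ≤ M := hMmax w2 hw2m
    rw [← hveq] at h5
    have : w2 = v := by omega
    rw [hveq] at this
    exact hw2ne this
  -- the count of v is below 9999
  have hvsmall : (arr.count v : Int) < 9999 := by
    have h1 := hvmin w3 hw3m
    have h2 : arr.count v ≤ arr.count w3 := by omega
    have h3 : arr.count w3 < 9999 := by omega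
    exact_mod_cast lt_of_le_of_lt h2 h3
  -- A's side: the sorted list and its groups
  rw [A_eq_scanFull arr, halt]
  set s := PySem.List.sorted arr (fun x => x) false with hs
  have hsperm : s.Perm arr := PySem.List.sorted_perm arr (fun x => x) false
  have hsp : s.Pairwise (· ≤ ·) := by
    have h := PySem.List.sorted_pairwise (xs := arr) (key := fun x => x) (α := Int) (κ := Int)
    simpa [hs] using h
  have hsne : s ≠ [] := by
    intro h
    rw [h] at hsperm
    exact hne (hsperm.symm.eq_nil)
  obtain ⟨y0, u0, hscons⟩ := List.exists_cons_of_ne_nil hsne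
  have hcnt : ∀ k, s.count k = arr.count k := fun k => hsperm.count_eq k
  -- dd s and its last element
  have hddne : dd s ≠ [] := by rw [hscons]; exact dd_ne_nil y0 u0
  have hddpw : (dd s).Pairwise (· < ·) := dd_pairwise_lt s hsp
  have hddlast : (dd s).getLast hddne = M := by
    have h1 : (dd s).getLast hddne ∈ arr := by
      have := List.getLast_mem hddne
      rw [mem_dd] at this
      exact hsperm.mem_iff.mp this
    have h2 : M ∈ dd s := by
      rw [mem_dd]
      exact hsperm.mem_iff.mpr hMmem
    have h3 := le_getLast_of_pairwise_lt (dd s) hddne hddpw M h2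
    have h4 := hMmax _ h1
    omega
  have hvdd : v ∈ (dd s).dropLast := by
    apply mem_dropLast_of_ne_getLast (dd s) hddne v
    · rw [mem_dd]
      exact hsperm.mem_iff.mpr hvmem
    · rw [hddlast]; exact hvneM
  -- evaluate A's scan
  rw [hscons, scanFull]
  rw [groupsFrom_eq_counts y0 u0 (fun y hy => List.rel_of_pairwise_cons (hscons ▸ hsp) hy)
      ((hscons ▸ hsp).of_cons)]
  rw [← hscons]
  rw [show (some y0, (9999 : Int)) = (some ((y0, (9999 : Int)).1), (y0, (9999 : Int)).2) from rfl]
  rw [fold_upd_selMin ((dd s).dropLast.map (fun k => (k, (s.count k : Int)))) (y0, 9999)]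
  have hsel : selMin (y0, 9999) ((dd s).dropLast.map (fun k => (k, (s.count k : Int))))
      = (v, (arr.count v : Int)) := by
    apply selMin_attains
    · refine List.mem_map.mpr ⟨v, hvdd, ?_⟩
      rw [hcnt v]
    · intro p hp hpne
      obtain ⟨k, hk, hkp⟩ := List.mem_map.mp hp
      have hkarr : k ∈ arr := by
        have := (mem_dd s k).mp ((List.dropLast_sublist _).subset hk)
        exact hsperm.mem_iff.mp this
      have hkv : k ≠ v := by
        intro h
        rw [h, hcnt v] at hkp
        exact hpne hkp.symm
      have h1 := hvmin k hkarr
      rw [← hkp]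
      simp only
      rw [hcnt k]
      have hkk : (k : Int) ≠ v := hkv
      omega
    · simpa using hvsmall
    · rw [List.pairwise_map]
      exact List.Pairwise.sublist (List.dropLast_sublist _) hddpw
  rw [hsel]

-- ===== VERDICT (by name: the statement is the Claim_ definition above) =====
theorem leastElementFromSortedArray_spec : Claim_unchanged_leastElementFromSortedArray := by
  intro arr _ hpre
  intro hnd
  exact unchanged_main arr hpre hnd

theorem leastElementFromSortedArray_changed : Claim_changed_leastElementFromSortedArray := by
  unfold Claim_changed_leastElementFromSortedArray
  refine ⟨by decide, by decide, by decide, ?_, by decide, by decide⟩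
  rw [A_eq_scanFull]
  decide
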